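-- pv_equiv track=rewrite | github.com/nhungla/Data-Structures-and-Algorithms | Blue/Algorithmic Complexity/Sereja and Dima - Codeforces.py | totalPoint
-- ===== SOURCE A (Python) =====
-- def totalPoint(arr):
--     l, r = 0, len(arr) - 1
--     se, di = 0, 0
--     check = True
--     while l <= r:
--         if arr[l] > arr[r]:
--             tmp = arr[l]
--             l += 1
--         else:
--             tmp = arr[r]
--             r -= 1
--         if check:
--             se += tmp
--             check = False
--         else:
--             di += tmp
--             check = True
--     return se, di
-- ===== SOURCE B (Python) =====
-- def totalPoint(arr):
--     # Collect the draw order with the same two-pointer greedy, then split by parity.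
--     picks = []
--     l, r = 0, len(arr) - 1
--     while l <= r:
--         if arr[l] > arr[r]:
--             picks.append(arr[l])
--             l += 1
--         else:
--             picks.append(arr[r])
--             r -= 1
--
--     # parity split: walk the draw order back-to-front, swapping the two running sums
--     e, o = 0, 0
--     for v in reversed(picks):
--         e, o = v + o, e
--     return (e, o)
-- ===== Notes on version B (the rewrite author's own statement) =====
-- stated objective: alternative
-- what changed: Replaces A's inline alternating se/di accumulator state machine with a two-phase algorithm: first collect the greedy draw order into a list, then split it into the two players' totals by a recursive parity split.
import Mathlib
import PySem

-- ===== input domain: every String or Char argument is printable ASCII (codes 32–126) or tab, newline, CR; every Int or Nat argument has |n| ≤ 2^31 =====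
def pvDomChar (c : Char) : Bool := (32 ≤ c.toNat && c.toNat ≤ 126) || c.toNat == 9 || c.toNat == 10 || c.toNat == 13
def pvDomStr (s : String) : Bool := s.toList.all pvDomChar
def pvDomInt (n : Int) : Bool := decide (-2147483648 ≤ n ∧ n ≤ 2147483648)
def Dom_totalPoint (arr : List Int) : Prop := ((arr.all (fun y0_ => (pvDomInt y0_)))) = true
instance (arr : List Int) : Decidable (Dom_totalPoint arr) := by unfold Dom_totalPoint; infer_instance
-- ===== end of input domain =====

-- B replaces A's alternating se/di accumulator with collect-the-draw-order then a recursive parity split (objective: alternative decomposition; return value only, B does not mutate its argument).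
-- ===== PORT A =====
-- while l <= r: take the larger end (ties to the right), add to se/di alternately via 'check'.
-- arr[l]/arr[r] are always in range when 0 <= l <= r < len arr, so pyGet?.getD 0 is exact here.
def totalPointLoopA (arr : List Int) (l r se di : Int) (check : Bool) : Int × Int :=
  if _h : l ≤ r then
    if (PySem.List.pyGet? arr l).getD 0 > (PySem.List.pyGet? arr r).getD 0 then
      let tmp := (PySem.List.pyGet? arr l).getD 0
      if check then totalPointLoopA arr (l + 1) r (se + tmp) di false
      else totalPointLoopA arr (l + 1) r se (di + tmp) true
    else
      let tmp := (PySem.List.pyGet? arr r).getD 0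
      if check then totalPointLoopA arr l (r - 1) (se + tmp) di false
      else totalPointLoopA arr l (r - 1) se (di + tmp) true
  else (se, di)
termination_by (r + 1 - l).toNat
decreasing_by all_goals omega

def totalPoint (arr : List Int) : Int × Int :=
  totalPointLoopA arr 0 ((arr.length : Int) - 1) 0 0 true

-- ===== PORT B =====
-- phase 1: same two-pointer scan, but appending each taken value to 'picks'
def pickLoop (arr : List Int) (l r : Int) (picks : List Int) : List Int :=
  if _h : l ≤ r then
    if (PySem.List.pyGet? arr l).getD 0 > (PySem.List.pyGet? arr r).getD 0 then
      pickLoop arr (l + 1) r (picks ++ [(PySem.List.pyGet? arr l).getD 0])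
    else
      pickLoop arr l (r - 1) (picks ++ [(PySem.List.pyGet? arr r).getD 0])
  else picks
termination_by (r + 1 - l).toNat
decreasing_by all_goals omega

-- phase 2: parity split — back-to-front pass swapping the two running sums
def totalPoint_alt (arr : List Int) : Int × Int :=
  (pickLoop arr 0 ((arr.length : Int) - 1) []).reverse.foldl
    (fun eo v => (v + eo.2, eo.1)) ((0 : Int), (0 : Int))

-- ===== PRECONDITION & SPEC =====
def Spec_totalPoint (arr : List Int) (out : Int × Int) : Prop := out = totalPoint_alt arr
instance (arr : List Int) (out : Int × Int) : Decidable (Spec_totalPoint arr out) := by unfold Spec_totalPoint; infer_instance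

-- ===== CLAIM (what is proved, stated in full; the proofs are below) =====
def Claim_equal_totalPoint : Prop := ∀ (arr : List Int), Dom_totalPoint arr → Spec_totalPoint arr (totalPoint arr)

-- ===== LEMMAS AND PROOFS =====
-- picks without the accumulator, for the proofs
def pickList (arr : List Int) (l r : Int) : List Int :=
  if _h : l ≤ r then
    if (PySem.List.pyGet? arr l).getD 0 > (PySem.List.pyGet? arr r).getD 0 then
      (PySem.List.pyGet? arr l).getD 0 :: pickList arr (l + 1) r
    else
      (PySem.List.pyGet? arr r).getD 0 :: pickList arr l (r - 1)
  else []
termination_by (r + 1 - l).toNat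
decreasing_by all_goals omega

-- splitSums is the proof-side view of B's reversed accumulator loop
def splitSums : List Int → Int × Int
  | [] => (0, 0)
  | x :: p => let eo := splitSums p; (x + eo.2, eo.1)

theorem splitSums_eq_foldl (p : List Int) :
    p.reverse.foldl (fun (eo : Int × Int) v => (v + eo.2, eo.1)) ((0 : Int), (0 : Int)) =
      splitSums p := by
  induction p with
  | nil => rfl
  | cons x p ih => simp [List.foldl_append, ih, splitSums]

theorem pickLoop_eq (arr : List Int) (l r : Int) (acc : List Int) :
    pickLoop arr l r acc = acc ++ pickList arr l r := by
  rw [pickLoop, pickList]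
  split
  · split
    · rw [pickLoop_eq arr (l+1) r, List.append_assoc]; rfl
    · rw [pickLoop_eq arr l (r-1), List.append_assoc]; rfl
  · simp
termination_by (r + 1 - l).toNat
decreasing_by all_goals omega

theorem loopA_eq (arr : List Int) (l r : Int) : ∀ (se di : Int) (check : Bool),
    totalPointLoopA arr l r se di check =
      (if check then (se + (splitSums (pickList arr l r)).1, di + (splitSums (pickList arr l r)).2)
       else (se + (splitSums (pickList arr l r)).2, di + (splitSums (pickList arr l r)).1)) := by
  intro se di check
  rw [totalPointLoopA, pickList]
  split
  · split
    · cases check <;>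
        (simp [loopA_eq arr (l+1) r, splitSums]; ring)
    · cases check <;>
        (simp [loopA_eq arr l (r-1), splitSums]; ring)
  · cases check <;> simp [splitSums]
termination_by (r + 1 - l).toNat
decreasing_by all_goals omega

-- ===== VERDICT (by name: the statement is the Claim_ definition above) =====
theorem totalPoint_spec : Claim_equal_totalPoint := by
  intro arr _
  unfold Spec_totalPoint totalPoint totalPoint_alt
  rw [loopA_eq, pickLoop_eq, List.nil_append, splitSums_eq_foldl]
  simp
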